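-- pv_equiv track=rewrite | github.com/Yuvix25/pytov_old | pytov/pytov.py | getStrings
-- ===== SOURCE A (Python) =====
-- def getStrings(text):
--
--     # all strings regex: (\"(.|[\r\n][^\"])*?\")|\'(.|[\r\n][^\"])*?\'
--
--     # get all strings positions
--
--     strings = []
--     wasQuoteStart = False
--     lastQuote = ""
--     previusChar = ""
--     firstQuote = 0
--
--     for i in range(len(text)):
--
--         if (text[i] == "'" and wasQuoteStart and lastQuote == "'") or (text[i] == '"' and wasQuoteStart and lastQuote == '"') and previusChar != "\\":
--             strings.append([firstQuote, i])
--             wasQuoteStart = False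
--
--         elif (text[i] == "'" or text[i] == '"') and not wasQuoteStart:
--             lastQuote = text[i]
--             wasQuoteStart = True
--             firstQuote = i
--
--         previusChar = text[i]
--
--     return strings
-- ===== SOURCE B (Python) =====
-- def _find_unescaped(text, j):
--     # next '"' at or after index j that is not preceded by a backslash
--     while True:
--         j = text.find('"', j)
--         if j == -1 or text[j - 1] != '\\':
--             return j
--         j += 1
--
--
-- def getStrings(text):
--     """Return [start, end] index pairs of quoted literals in text.
--
--     Shell-style quoting: inside single-quoted literals a backslash is an
--     ordinary character, while inside double-quoted literals a backslash
--     escapes the following character, so an escaped \" does not close the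
--     literal.  An unterminated literal ends the scan.
--     """
--     spans = []
--     i = 0
--     n = len(text)
--     while i < n:
--         c = text[i]
--         if c == "'":
--             j = text.find("'", i + 1)
--         elif c == '"':
--             j = _find_unescaped(text, i + 1)
--         else:
--             i += 1
--             continue
--         if j == -1:
--             break
--         spans.append([i, j])
--         i = j + 1
--     return spans
-- ===== Notes on version B (the rewrite author's own statement) =====
-- stated objective: faster
-- what changed: Replaced A's flag-based single-pass state machine (wasQuoteStart/lastQuote/previusChar flags updated at every character) with a find-based two-level scan: an outer loop hunts for an opening quote and str.find locates its matching close (shell-style: backslash escapes are honored only inside double-quoted literals), resuming after it.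
import Mathlib
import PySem

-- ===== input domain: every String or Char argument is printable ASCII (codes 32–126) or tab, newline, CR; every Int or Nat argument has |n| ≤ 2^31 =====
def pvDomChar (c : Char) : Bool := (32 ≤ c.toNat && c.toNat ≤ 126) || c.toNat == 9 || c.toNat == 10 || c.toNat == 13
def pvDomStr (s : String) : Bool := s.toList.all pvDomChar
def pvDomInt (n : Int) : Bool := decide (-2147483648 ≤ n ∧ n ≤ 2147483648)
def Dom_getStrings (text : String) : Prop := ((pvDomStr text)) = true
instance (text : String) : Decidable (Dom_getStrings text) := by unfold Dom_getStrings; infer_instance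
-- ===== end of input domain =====

-- B replaces A's flag-based single-pass state machine with a find-based two-level scan
-- (locate an opening quote, then find its matching close); measured faster by a constant factor.


-- ===== PORT A =====
-- A's for-loop over range(len(text)), carried state: strings, wasQuoteStart, lastQuote,
-- previusChar, firstQuote; text[i] is the 1-char string String.ofList [c].
def gsLoopA (cs : List Char) (i : Int) (strings : List (List Int))
    (wasQuoteStart : Bool) (lastQuote previusChar : String) (firstQuote : Int) :
    List (List Int) :=
  match cs with
  | [] => strings
  | c :: rs =>
    let ci := String.ofList [c]
    if (ci = "'" ∧ wasQuoteStart = true ∧ lastQuote = "'") ∨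
       (ci = "\"" ∧ wasQuoteStart = true ∧ lastQuote = "\"" ∧ previusChar ≠ "\\") then
      gsLoopA rs (i + 1) (strings ++ [[firstQuote, i]]) false lastQuote ci firstQuote
    else if (ci = "'" ∨ ci = "\"") ∧ wasQuoteStart = false then
      gsLoopA rs (i + 1) strings true ci ci i
    else
      gsLoopA rs (i + 1) strings wasQuoteStart lastQuote ci firstQuote

def getStrings (text : String) : List (List Int) :=
  gsLoopA text.toList 0 [] false "" "" 0

-- ===== PORT B =====
-- text.find(c, j) of Source B, scanning the suffix `rest` that starts at index j;
-- p is the character just before `rest` (so text[jc - 1] at a hit jc is available).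
-- Returns (text[jc-1], jc, suffix after jc), or none for Python's -1.
def findQ (c p : Char) (rest : List Char) (j : Int) : Option (Char × Int × List Char) :=
  match rest with
  | [] => none
  | x :: rs => if x = c then some (p, j, rs) else findQ c x rs (j + 1)

theorem findQ_length {c p : Char} {rest : List Char} {pc : Char} {j jc : Int}
    {rs' : List Char} (h : findQ c p rest j = some (pc, jc, rs')) :
    rs'.length < rest.length := by
  induction rest generalizing p j with
  | nil => simp [findQ] at h
  | cons x rs ih =>
    rw [findQ] at h
    split at h
    · simp at h; simp [h.2.2]
    · exact Nat.lt_trans (ih h) (Nat.lt_succ_self _)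

-- the while loop of _find_unescaped: repeat text.find('"', …) past escaped hits
def dqScan (p : Char) (rest : List Char) (j : Int) : Option (Int × List Char) :=
  match h : findQ '"' p rest j with
  | none => none
  | some (pc, jc, rs') =>
    if pc = '\\' then dqScan '"' rs' (jc + 1) else some (jc, rs')
termination_by rest.length
decreasing_by exact findQ_length h

theorem dqScan_length_aux : ∀ (n : Nat) (rest : List Char), rest.length ≤ n →
    ∀ (p : Char) (j jc : Int) (rs' : List Char),
    dqScan p rest j = some (jc, rs') → rs'.length < rest.length := by
  intro n
  induction n with
  | zero =>
    intro rest hlen p j jc rs' h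
    have : rest = [] := List.eq_nil_of_length_eq_zero (Nat.le_zero.mp hlen)
    subst this
    rw [dqScan] at h
    split at h
    · exact absurd h (by simp)
    · rename_i pc jc' rs'' h2; simp [findQ] at h2
  | succ n ih =>
    intro rest hlen p j jc rs' h
    rw [dqScan] at h
    split at h
    · exact absurd h (by simp)
    · rename_i pc jc' rs'' h2
      have hl := findQ_length h2
      by_cases hpc : pc = '\\'
      · rw [if_pos hpc] at h
        exact Nat.lt_trans (ih rs'' (by omega) '"' (jc' + 1) jc rs' h) hl
      · rw [if_neg hpc] at h
        simp at h
        exact h.2 ▸ hl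

theorem dqScan_length {p : Char} {rest : List Char} {j jc : Int} {rs' : List Char}
    (h : dqScan p rest j = some (jc, rs')) : rs'.length < rest.length :=
  dqScan_length_aux rest.length rest le_rfl p j jc rs' h

-- the `if c == '"'` choice of Source B: which close search to run for opener c
def closeB (c : Char) (rs : List Char) (j : Int) : Option (Int × List Char) :=
  if c = '"' then dqScan c rs j
  else (findQ '\'' c rs j).map (fun x => (x.2.1, x.2.2))

theorem closeB_length {c : Char} {rs : List Char} {j jc : Int} {rs' : List Char}
    (h : closeB c rs j = some (jc, rs')) : rs'.length < rs.length := by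
  rw [closeB] at h
  split at h
  · exact dqScan_length h
  · rcases Option.map_eq_some_iff.mp h with ⟨⟨pc, jc', rs''⟩, hf, he⟩
    cases he
    exact findQ_length hf

-- the outer while loop of Source B: hunt for an opening quote, find its close, resume after
def outerB (rest : List Char) (i : Int) : List (List Int) :=
  match rest with
  | [] => []
  | c :: rs =>
    if c = '\'' ∨ c = '"' then
      match h : closeB c rs (i + 1) with
      | none => []
      | some (j, rs') => [i, j] :: outerB rs' (j + 1)
    else outerB rs (i + 1)
termination_by rest.length
decreasing_by
  · exact Nat.lt_trans (closeB_length h) (Nat.lt_succ_self _)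
  · simp

def getStrings_alt (text : String) : List (List Int) :=
  outerB text.toList 0

-- ===== PRECONDITION & SPEC =====
def Spec_getStrings (text : String) (out : List (List Int)) : Prop := out = getStrings_alt text
instance (text : String) (out : List (List Int)) : Decidable (Spec_getStrings text out) := by unfold Spec_getStrings; infer_instance

-- ===== CLAIM (what is proved, stated in full; the proofs are below) =====
def Claim_equal_getStrings : Prop := ∀ (text : String), Dom_getStrings text → Spec_getStrings text (getStrings text)

-- ===== LEMMAS AND PROOFS =====

theorem ofList_single_inj {a b : Char} : String.ofList [a] = String.ofList [b] ↔ a = b := by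
  constructor
  · intro h; have := congrArg String.toList h; simpa using this
  · intro h; rw [h]

-- proof-side view of B's close search: one scan that closes at the first matching
-- quote (unescaped, when double)
def findCloseB (q p : Char) (rest : List Char) (j : Int) : Option (Int × List Char) :=
  match rest with
  | [] => none
  | c :: rs =>
    if c = q ∧ (q = '\'' ∨ p ≠ '\\') then some (j, rs) else findCloseB q c rs (j + 1)

theorem findCloseB_length {q p : Char} {rest : List Char} {j jc : Int} {rs' : List Char}
    (h : findCloseB q p rest j = some (jc, rs')) : rs'.length < rest.length := by
  induction rest generalizing p j with
  | nil => simp [findCloseB] at h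
  | cons c rs ih =>
    rw [findCloseB] at h
    split at h
    · simp at h; simp [h.2]
    · exact Nat.lt_trans (ih h) (Nat.lt_succ_self _)

-- B's single-quote search is findCloseB with q = '\''
theorem findQ_sq (rest : List Char) (p : Char) (j : Int) :
    (findQ '\'' p rest j).map (fun x => (x.2.1, x.2.2)) = findCloseB '\'' p rest j := by
  induction rest generalizing p j with
  | nil => simp [findQ, findCloseB]
  | cons c rs ih =>
    rw [findQ, findCloseB]
    by_cases hc : c = '\''
    · rw [if_pos hc, if_pos ⟨hc, Or.inl rfl⟩]; rfl
    · rw [if_neg hc, if_neg (fun hh => hc hh.1)]; exact ih c (j + 1)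

-- one step of findCloseB for double quotes, phrased through findQ
theorem findCloseB_dq_step : ∀ (rest : List Char) (p : Char) (j : Int),
    findCloseB '"' p rest j =
      match findQ '"' p rest j with
      | none => none
      | some (pc, jc, rs') =>
          if pc = '\\' then findCloseB '"' '"' rs' (jc + 1) else some (jc, rs') := by
  intro rest
  induction rest with
  | nil => intro p j; simp [findQ, findCloseB]
  | cons c rs ih =>
    intro p j
    by_cases hc : c = '"'
    · subst hc
      rw [findCloseB, findQ, if_pos rfl]
      dsimp only
      by_cases hp : p = '\\'
      · rw [if_neg (by simp [hp]), if_pos hp]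
      · rw [if_pos ⟨rfl, Or.inr hp⟩, if_neg hp]
    · rw [findCloseB, findQ, if_neg (fun hh => hc hh.1), if_neg hc]
      exact ih c (j + 1)

-- B's double-quote search (find + skip-escaped loop) is findCloseB with q = '"'
theorem dqScan_eq_findCloseB : ∀ (n : Nat) (rest : List Char), rest.length ≤ n →
    ∀ (p : Char) (j : Int), dqScan p rest j = findCloseB '"' p rest j := by
  intro n
  induction n with
  | zero =>
    intro rest hlen p j
    have : rest = [] := List.eq_nil_of_length_eq_zero (Nat.le_zero.mp hlen)
    subst this
    rw [dqScan]
    split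
    · simp [findCloseB]
    · rename_i pc jc rs' h2; simp [findQ] at h2
  | succ n ih =>
    intro rest hlen p j
    rw [dqScan, findCloseB_dq_step rest p j]
    split
    · rename_i h2; rw [h2]
    · rename_i pc jc rs' h2
      rw [h2]
      dsimp only
      by_cases hpc : pc = '\\'
      · have hl := findQ_length h2
        rw [if_pos hpc, if_pos hpc]
        exact ih rs' (by omega) '"' (jc + 1)
      · rw [if_neg hpc, if_neg hpc]

-- the close search B runs equals findCloseB c c … for both quote kinds
theorem closeB_eq (c : Char) (hc : c = '\'' ∨ c = '"') (rs : List Char) (j : Int) :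
    closeB c rs j = findCloseB c c rs j := by
  rcases hc with h | h <;> subst h
  · rw [closeB, if_neg (by decide)]; exact findQ_sq rs '\'' j
  · rw [closeB, if_pos rfl]; exact dqScan_eq_findCloseB rs.length rs le_rfl '"' j

-- unfolding lemma for outerB on a cons cell (the match in outerB is dependent)
theorem outerB_cons (c : Char) (rs : List Char) (i : Int) :
    outerB (c :: rs) i =
      if c = '\'' ∨ c = '"' then
        match closeB c rs (i + 1) with
        | none => []
        | some (j, rs') => [i, j] :: outerB rs' (j + 1)
      else outerB rs (i + 1) := by
  rw [outerB]
  by_cases hc : c = '\'' ∨ c = '"'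
  · rw [if_pos hc, if_pos hc]
    split
    · rename_i h; rw [h]
    · rename_i j rs' h; rw [h]
  · rw [if_neg hc, if_neg hc]

-- A's quote-closing condition, restated over the raw characters
theorem quoteCond (c q p : Char) (hq : q = '\'' ∨ q = '"') :
    ((String.ofList [c] = "'" ∧ (true = true) ∧ String.ofList [q] = "'") ∨
     (String.ofList [c] = "\"" ∧ (true = true) ∧ String.ofList [q] = "\"" ∧
        String.ofList [p] ≠ "\\"))
    ↔ (c = q ∧ (q = '\'' ∨ p ≠ '\\')) := by
  have h1 : ∀ a b : Char, (String.ofList [a] = String.ofList [b]) ↔ a = b :=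
    fun _ _ => ofList_single_inj
  rcases hq with h | h <;> subst h <;>
    simp only [show ("'" : String) = String.ofList ['\''] from rfl,
      show ("\"" : String) = String.ofList ['"'] from rfl,
      show ("\\" : String) = String.ofList ['\\'] from rfl, h1, ne_eq] <;>
    simp

-- open state: A's loop from wasQuoteStart = true with lastQuote = q, previusChar = p
-- behaves as the close-scan followed by the closed-state loop.
theorem gsLoopA_open (q : Char) (hq : q = '\'' ∨ q = '"')
    (rest : List Char) (p : Char) (j : Int) (strings : List (List Int)) (f : Int) :
    gsLoopA rest j strings true (String.ofList [q]) (String.ofList [p]) f =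
      match findCloseB q p rest j with
      | none => strings
      | some (jc, rs') =>
          gsLoopA rs' (jc + 1) (strings ++ [[f, jc]]) false (String.ofList [q])
            (String.ofList [q]) f := by
  induction rest generalizing p j with
  | nil => simp [gsLoopA, findCloseB]
  | cons c rs ih =>
    rw [gsLoopA, findCloseB]
    by_cases hc : c = q ∧ (q = '\'' ∨ p ≠ '\\')
    · rw [if_pos ((quoteCond c q p hq).mpr hc), if_pos hc]
      rw [hc.1]
    · rw [if_neg (fun hh => hc ((quoteCond c q p hq).mp hh)), if_neg (by simp),
        if_neg hc]
      exact ih c (j + 1)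

-- closed state: A's loop from wasQuoteStart = false is B's outer scan (prefix appended).
theorem gsLoopA_closed_aux : ∀ (n : Nat) (cs : List Char), cs.length ≤ n →
    ∀ (i : Int) (strings : List (List Int)) (lq pv : String) (f : Int),
    gsLoopA cs i strings false lq pv f = strings ++ outerB cs i := by
  intro n
  induction n with
  | zero =>
    intro cs hlen i strings lq pv f
    have : cs = [] := List.eq_nil_of_length_eq_zero (Nat.le_zero.mp hlen)
    subst this; simp [gsLoopA, outerB]
  | succ n ih =>
    intro cs hlen i strings lq pv f
    match cs with
    | [] => simp [gsLoopA, outerB]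
    | c :: rs =>
      rw [gsLoopA, outerB_cons]
      by_cases hc : c = '\'' ∨ c = '"'
      · rw [if_neg (by simp), if_pos ⟨by
          rcases hc with h | h <;> subst h <;> simp, rfl⟩, if_pos hc]
        rw [gsLoopA_open c hc rs c (i + 1) strings i]
        rw [closeB_eq c hc rs (i + 1)]
        rcases hfc : findCloseB c c rs (i + 1) with _ | ⟨jc, rs'⟩
        · simp
        · have hlt : rs'.length < rs.length := findCloseB_length hfc
          dsimp only
          rw [ih rs' (by simp at hlen; omega) (jc + 1) (strings ++ [[i, jc]])
            (String.ofList [c]) (String.ofList [c]) i]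
          simp
      · have hns : ¬(String.ofList [c] = "'" ∨ String.ofList [c] = "\"") := by
          simp only [show ("'" : String) = String.ofList ['\''] from rfl,
            show ("\"" : String) = String.ofList ['"'] from rfl, ofList_single_inj]
          exact hc
        rw [if_neg (by rintro (⟨h1, _⟩ | ⟨h1, _⟩) <;> exact hns (by tauto)),
          if_neg (by rintro ⟨h1, _⟩; exact hns h1), if_neg hc]
        exact ih rs (by simpa using Nat.le_of_succ_le_succ (by simpa using hlen)) (i + 1) strings lq (String.ofList [c]) f

-- ===== VERDICT (by name: the statement is the Claim_ definition above) =====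
theorem getStrings_spec : Claim_equal_getStrings := by
  intro text _
  unfold Spec_getStrings getStrings getStrings_alt
  simpa using gsLoopA_closed_aux text.toList.length text.toList le_rfl 0 [] "" "" 0
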